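-- pv_equiv track=rewrite | github.com/MattVoid/promise | fetch/Response/Headers.py | __parse_init
-- ===== SOURCE A (Python) =====
-- def __parse_init(init: dict):
--
-- 	headers = {}
--
-- 	for name, value in init.items():
--
-- 		name = name.lower()
--
-- 		if name in headers:
-- 			headers[name] = f"{headers[name]}, {value}"
-- 		else:
-- 			headers[name] = value
--
-- 	return headers
-- ===== SOURCE B (Python) =====
-- def __parse_init(init: dict):
--     # Phase 1: group values by lowercased name, preserving first-appearance order.
--     groups = {}
--     for name, value in init.items():
--         groups.setdefault(name.lower(), []).append(value)
--     # Phase 2: combine each group with ", ".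
--     return {name: ", ".join(values) for name, values in groups.items()}
-- ===== Notes on version B (the rewrite author's own statement) =====
-- stated objective: alternative
-- what changed: A builds the result in one fold that extends the stored string on every repeated lowercased name; B first groups all values per lowercased name in one pass and then joins each group with ', ' in a second pass.
import Mathlib
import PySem

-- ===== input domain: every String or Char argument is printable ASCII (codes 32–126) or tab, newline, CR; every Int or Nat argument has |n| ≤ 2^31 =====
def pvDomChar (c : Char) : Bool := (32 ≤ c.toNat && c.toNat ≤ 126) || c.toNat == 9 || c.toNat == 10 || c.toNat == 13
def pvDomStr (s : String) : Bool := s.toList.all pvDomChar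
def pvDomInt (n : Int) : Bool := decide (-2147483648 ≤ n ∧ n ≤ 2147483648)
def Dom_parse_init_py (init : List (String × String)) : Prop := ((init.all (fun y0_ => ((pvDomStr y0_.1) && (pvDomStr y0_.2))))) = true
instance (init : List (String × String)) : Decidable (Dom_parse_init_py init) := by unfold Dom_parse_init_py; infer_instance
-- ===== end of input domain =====

-- B replaces A's running string-concatenation fold by a two-phase group-then-join decomposition (alternative algorithm, same cost).


-- ===== PORT A =====
-- A: one running fold; on a repeated (lowercased) name the stored string is extended with ", " + value.
def parse_init_py (init : List (String × String)) : List (String × String) :=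
  (init.foldl (fun (headers : PySem.Dict String String) nv =>
      let name := PySem.Str.lower nv.1
      match headers.get? name with
      | some old => headers.insert name (PySem.Str.join ", " [old, nv.2])  -- f"{headers[name]}, {value}"
      | none     => headers.insert name nv.2)
    PySem.Dict.empty).items

-- ===== PORT B =====
-- B: phase 1 groups values per lowercased name (setdefault(..., []).append(v), i.e. d[k] = d.get(k, []) + [v] = modify);
-- phase 2 joins each group with ", ".
def parse_init_py_alt (init : List (String × String)) : List (String × String) :=
  let groups : PySem.Dict String (List String) :=
    init.foldl (fun g nv => g.modify (PySem.Str.lower nv.1) [] (· ++ [nv.2])) PySem.Dict.empty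
  groups.items.map (fun p => (p.1, PySem.Str.join ", " p.2))

-- ===== PRECONDITION & SPEC =====
def Spec_parse_init_py (init : List (String × String)) (out : List (String × String)) : Prop := out = parse_init_py_alt init
instance (init : List (String × String)) (out : List (String × String)) : Decidable (Spec_parse_init_py init out) := by unfold Spec_parse_init_py; infer_instance

-- ===== CLAIM (what is proved, stated in full; the proofs are below) =====
def Claim_equal_parse_init_py : Prop := ∀ (init : List (String × String)), Dom_parse_init_py init → Spec_parse_init_py init (parse_init_py init)

-- ===== LEMMAS AND PROOFS =====

-- joining one more part onto a nonempty list of parts appends "sep + part" (Chars level)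
theorem chars_join_append_singleton (sep p : List Char) (ps : List (List Char)) (h : ps ≠ []) :
    PySem.Chars.join sep (ps ++ [p]) = PySem.Chars.join sep ps ++ sep ++ p := by
  induction ps with
  | nil => simp at h
  | cons q rest ih =>
    cases rest with
    | nil => simp [PySem.Chars.join_cons_cons, PySem.Chars.join_singleton]
    | cons r rest' =>
      have h1 : (q :: r :: rest') ++ [p] = q :: r :: (rest' ++ [p]) := by simp
      have h2 : r :: (rest' ++ [p]) = (r :: rest') ++ [p] := by simp
      rw [h1, PySem.Chars.join_cons_cons, h2, ih (by simp),
        PySem.Chars.join_cons_cons]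
      simp

-- String-level: A's repeated-key update of an existing header equals joining the extended group
theorem str_join_snoc (vs : List String) (v : String) (h : vs ≠ []) :
    PySem.Str.join ", " [PySem.Str.join ", " vs, v] = PySem.Str.join ", " (vs ++ [v]) := by
  simp only [PySem.Str.join, List.map_cons, List.map_nil, List.map_append,
    String.toList_ofList]
  rw [chars_join_append_singleton _ _ _ (by simpa using h),
    PySem.Chars.join_cons_cons, PySem.Chars.join_singleton]

theorem str_join_singleton (v : String) : PySem.Str.join ", " [v] = v := by
  simp [PySem.Str.join, PySem.Chars.join_singleton]

-- the value map B applies in phase 2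
def pvF (p : String × List String) : String × String := (p.1, PySem.Str.join ", " p.2)

-- lookup in a dict whose items are the pvF-image of another dict's items
theorem get?_map_items (items : List (String × List String)) (k : String) :
    (PySem.Dict.mk (items.map pvF) : PySem.Dict String String).get? k
      = ((PySem.Dict.mk items).get? k).map (PySem.Str.join ", ") := by
  induction items with
  | nil => simp [PySem.Dict.get?]
  | cons p rest ih =>
    obtain ⟨k0, vs⟩ := p
    simp only [List.map_cons, pvF, PySem.Dict.get?_mk_cons]
    split_ifs <;> simp_all

-- main invariant: along the two folds, A's dict is the pvF-image of B's dict, and every group is nonempty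
theorem fold_inv (l : List (String × String)) (g : PySem.Dict String (List String))
    (hne : ∀ p ∈ g.items, p.2 ≠ []) :
    (l.foldl (fun (headers : PySem.Dict String String) nv =>
        let name := PySem.Str.lower nv.1
        match headers.get? name with
        | some old => headers.insert name (PySem.Str.join ", " [old, nv.2])
        | none     => headers.insert name nv.2) (PySem.Dict.mk (g.items.map pvF))).items
      = ((l.foldl (fun g nv => g.modify (PySem.Str.lower nv.1) [] (· ++ [nv.2])) g).items).map pvF := by
  induction l generalizing g with
  | nil => simp
  | cons nv l' ih =>
    have hget : (PySem.Dict.mk (g.items.map pvF) : PySem.Dict String String).get? (PySem.Str.lower nv.1)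
        = (g.get? (PySem.Str.lower nv.1)).map (PySem.Str.join ", ") := get?_map_items g.items _
    simp only [List.foldl_cons]
    cases hgk : g.get? (PySem.Str.lower nv.1) with
    | none =>
      have hcg : g.contains (PySem.Str.lower nv.1) = false := by
        rw [PySem.Dict.contains_eq_isSome_get?, hgk]; rfl
      have hch : (PySem.Dict.mk (g.items.map pvF) : PySem.Dict String String).contains (PySem.Str.lower nv.1) = false := by
        rw [PySem.Dict.contains_eq_isSome_get?, hget, hgk]; rfl
      have hstep : (PySem.Dict.mk (g.items.map pvF) : PySem.Dict String String).insert (PySem.Str.lower nv.1) nv.2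
          = PySem.Dict.mk (((g.insert (PySem.Str.lower nv.1) [nv.2]).items).map pvF) := by
        apply PySem.Dict.ext
        rw [PySem.Dict.items_insert_of_not_contains _ _ hch,
          PySem.Dict.items_insert_of_not_contains _ _ hcg]
        simp [pvF, str_join_singleton]
      have hne' : ∀ p ∈ (g.insert (PySem.Str.lower nv.1) [nv.2]).items, p.2 ≠ [] := by
        intro p hp
        rcases (PySem.Dict.mem_items_insert _ _ _ _).1 hp with h | ⟨h, _⟩
        · subst h; simp
        · exact hne p h
      have hB : g.modify (PySem.Str.lower nv.1) [] (· ++ [nv.2])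
          = g.insert (PySem.Str.lower nv.1) [nv.2] := by
        show g.insert (PySem.Str.lower nv.1) (g.getD (PySem.Str.lower nv.1) [] ++ [nv.2]) = _
        rw [PySem.Dict.getD_of_get?_eq_none _ _ hgk]
        rfl
      simp only [hget, hgk, Option.map_none, hB, hstep]
      exact ih (g.insert (PySem.Str.lower nv.1) [nv.2]) hne'
    | some vs =>
      have hvs : vs ≠ [] := hne (PySem.Str.lower nv.1, vs) (PySem.Dict.mem_items_of_get?_eq_some _ hgk)
      have hcg : g.contains (PySem.Str.lower nv.1) = true := by
        rw [PySem.Dict.contains_eq_isSome_get?, hgk]; rfl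
      have hch : (PySem.Dict.mk (g.items.map pvF) : PySem.Dict String String).contains (PySem.Str.lower nv.1) = true := by
        rw [PySem.Dict.contains_eq_isSome_get?, hget, hgk]; rfl
      have hstep : (PySem.Dict.mk (g.items.map pvF) : PySem.Dict String String).insert (PySem.Str.lower nv.1)
            (PySem.Str.join ", " (vs ++ [nv.2]))
          = PySem.Dict.mk (((g.insert (PySem.Str.lower nv.1) (vs ++ [nv.2])).items).map pvF) := by
        apply PySem.Dict.ext
        rw [PySem.Dict.items_insert_of_contains _ _ hch,
          PySem.Dict.items_insert_of_contains _ _ hcg]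
        simp only [List.map_map]
        apply List.map_congr_left
        intro p _
        by_cases hpk : p.1 = PySem.Str.lower nv.1 <;> simp [pvF, hpk]
      have hne' : ∀ p ∈ (g.insert (PySem.Str.lower nv.1) (vs ++ [nv.2])).items, p.2 ≠ [] := by
        intro p hp
        rcases (PySem.Dict.mem_items_insert _ _ _ _).1 hp with h | ⟨h, _⟩
        · subst h; simp
        · exact hne p h
      have hB : g.modify (PySem.Str.lower nv.1) [] (· ++ [nv.2])
          = g.insert (PySem.Str.lower nv.1) (vs ++ [nv.2]) := by
        show g.insert (PySem.Str.lower nv.1) (g.getD (PySem.Str.lower nv.1) [] ++ [nv.2]) = _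
        rw [PySem.Dict.getD_of_get?_eq_some _ _ hgk]
      simp only [hget, hgk, Option.map_some, str_join_snoc vs nv.2 hvs, hB, hstep]
      exact ih (g.insert (PySem.Str.lower nv.1) (vs ++ [nv.2])) hne'

-- ===== VERDICT (by name: the statement is the Claim_ definition above) =====
theorem parse_init_py_spec : Claim_equal_parse_init_py := by
  intro init _
  show parse_init_py init = parse_init_py_alt init
  unfold parse_init_py parse_init_py_alt
  have h := fold_inv init PySem.Dict.empty (by intro p hp; simp [PySem.Dict.empty] at hp)
  simpa [PySem.Dict.empty] using h
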